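-- pv_equiv track=rewrite | github.com/hawkeyed-panda/memoire-de-parfum | app/pipeline/fragrance_pipeline.py | _apply_refinement_to_candidates
-- ===== SOURCE A (Python) =====
-- NOTE_LAYER_MAP = {
--     "bergamot": "top", "neroli": "top", "pink pepper": "top",
--     "black pepper": "top",
--     "rose": "heart", "jasmine": "heart", "geranium": "heart",
--     "lavender": "heart",
--     "sandalwood": "base", "vetiver": "base", "vanilla": "base",
--     "patchouli": "base", "cedarwood": "base", "amber": "base",
-- }
--
-- REFINEMENT_DIRECTION_MAP = {
--     "warmer": ["vanilla", "amber", "sandalwood", "patchouli"],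
--     "fresher": ["bergamot", "neroli", "lavender", "geranium"],
--     "lighter": ["neroli", "geranium", "bergamot"],
--     "stronger": ["vetiver", "patchouli", "amber", "cedarwood"],
-- }
--
-- def _apply_refinement_to_candidates(
--     graph_candidates: dict,
--     refinement: str,
-- ) -> dict:
--     """
--     Reorders and injects notes into graph candidates based on the
--     refinement direction so the constraint selector picks different notes.
--     """
--     direction_notes = REFINEMENT_DIRECTION_MAP.get(refinement, [])
--     if not direction_notes:
--         return graph_candidates
--
--     top = list(graph_candidates.get("top_candidates", []))
--     heart = list(graph_candidates.get("heart_candidates", []))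
--     base = list(graph_candidates.get("base_candidates", []))
--
--     for note in direction_notes:
--         layer = NOTE_LAYER_MAP.get(note)
--         if layer == "top":
--             if note not in top:
--                 top.insert(0, note)
--             else:
--                 top.remove(note)
--                 top.insert(0, note)
--         elif layer == "heart":
--             if note not in heart:
--                 heart.insert(0, note)
--             else:
--                 heart.remove(note)
--                 heart.insert(0, note)
--         elif layer == "base":
--             if note not in base:
--                 base.insert(0, note)
--             else:
--                 base.remove(note)
--                 base.insert(0, note)
--
--     return {
--         "top_candidates": top[:5],
--         "heart_candidates": heart[:5],
--         "base_candidates": base[:5],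
--         "excluded": graph_candidates.get("excluded", []),
--     }
-- ===== SOURCE B (Python) =====
-- NOTE_LAYER_MAP = {
--     "bergamot": "top", "neroli": "top", "pink pepper": "top",
--     "black pepper": "top",
--     "rose": "heart", "jasmine": "heart", "geranium": "heart",
--     "lavender": "heart",
--     "sandalwood": "base", "vetiver": "base", "vanilla": "base",
--     "patchouli": "base", "cedarwood": "base", "amber": "base",
-- }
--
-- REFINEMENT_DIRECTION_MAP = {
--     "warmer": ["vanilla", "amber", "sandalwood", "patchouli"],
--     "fresher": ["bergamot", "neroli", "lavender", "geranium"],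
--     "lighter": ["neroli", "geranium", "bergamot"],
--     "stronger": ["vetiver", "patchouli", "amber", "cedarwood"],
-- }
--
--
-- def _apply_refinement_to_candidates(graph_candidates, refinement):
--     direction_notes = REFINEMENT_DIRECTION_MAP.get(refinement, [])
--     if not direction_notes:
--         return graph_candidates
--
--     def rebuild(key, layer):
--         # the direction notes that belong to this layer, in direction order
--         moved = [n for n in direction_notes if NOTE_LAYER_MAP.get(n) == layer]
--         # drop ONE occurrence of each moved note from the original list, one pass
--         pending = set(moved)
--         rest = []
--         for x in graph_candidates.get(key, []):
--             if x in pending: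
--                 pending.discard(x)
--             else:
--                 rest.append(x)
--         # moved notes end up at the front, most recently processed first
--         return (list(reversed(moved)) + rest)[:5]
--
--     return {
--         "top_candidates": rebuild("top_candidates", "top"),
--         "heart_candidates": rebuild("heart_candidates", "heart"),
--         "base_candidates": rebuild("base_candidates", "base"),
--         "excluded": graph_candidates.get("excluded", []),
--     }
-- ===== Notes on version B (the rewrite author's own statement) =====
-- stated objective: alternative
-- what changed: B groups the direction notes by layer once (a filter per layer) and rebuilds each layer list as reversed-moved-notes plus a single pass over the original list that drops one occurrence of each moved note, replacing A's per-note remove()+insert(0) mutation loop.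
import Mathlib
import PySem

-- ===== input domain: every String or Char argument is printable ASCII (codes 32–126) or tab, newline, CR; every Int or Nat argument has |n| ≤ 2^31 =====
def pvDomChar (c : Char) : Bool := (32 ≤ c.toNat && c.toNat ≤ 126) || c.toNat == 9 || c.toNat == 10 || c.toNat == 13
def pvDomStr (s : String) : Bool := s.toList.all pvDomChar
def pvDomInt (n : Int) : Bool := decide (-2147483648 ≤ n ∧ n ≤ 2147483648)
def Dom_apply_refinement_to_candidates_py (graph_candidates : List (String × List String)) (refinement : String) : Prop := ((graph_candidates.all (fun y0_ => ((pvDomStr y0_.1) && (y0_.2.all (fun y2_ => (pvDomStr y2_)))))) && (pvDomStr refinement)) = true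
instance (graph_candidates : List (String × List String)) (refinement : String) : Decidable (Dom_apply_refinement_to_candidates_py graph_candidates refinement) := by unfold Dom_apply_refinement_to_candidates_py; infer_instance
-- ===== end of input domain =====

-- B groups the direction notes by layer once and rebuilds each layer with a single drop-one-occurrence
-- pass instead of A's per-note remove/re-insert loop; same return value, objective: alternative decomposition.

-- Shared module constants (the two Python files share these dict literals) and the
-- dict.get(key, default) read on the input dict (association list, first match).
def pvNoteLayerMap : PySem.Dict String String := PySem.Dict.ofList
  [("bergamot", "top"), ("neroli", "top"), ("pink pepper", "top"),
   ("black pepper", "top"),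
   ("rose", "heart"), ("jasmine", "heart"), ("geranium", "heart"),
   ("lavender", "heart"),
   ("sandalwood", "base"), ("vetiver", "base"), ("vanilla", "base"),
   ("patchouli", "base"), ("cedarwood", "base"), ("amber", "base")]

def pvRefinementDirectionMap : PySem.Dict String (List String) := PySem.Dict.ofList
  [("warmer", ["vanilla", "amber", "sandalwood", "patchouli"]),
   ("fresher", ["bergamot", "neroli", "lavender", "geranium"]),
   ("lighter", ["neroli", "geranium", "bergamot"]),
   ("stronger", ["vetiver", "patchouli", "amber", "cedarwood"])]

def pvDictGetD (gc : List (String × List String)) (k : String) (dflt : List String) : List String :=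
  match gc.find? (fun p => p.1 == k) with
  | some p => p.2
  | none => dflt

-- ===== PORT A =====
-- A's loop body for one direction note on one layer list:
-- if note not in xs: xs.insert(0, note) else: xs.remove(note); xs.insert(0, note)
-- (remove? is some here because the else-branch has note ∈ xs, so getD is exact)
def pvMoveFront (xs : List String) (note : String) : List String :=
  if xs.contains note = false then PySem.List.insert xs 0 note
  else PySem.List.insert ((PySem.List.remove? xs note).getD xs) 0 note

def pvApplyStep (st : List String × List String × List String) (note : String) :
    List String × List String × List String :=
  let layer := pvNoteLayerMap.get? note
  if layer = some "top" then (pvMoveFront st.1 note, st.2.1, st.2.2)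
  else if layer = some "heart" then (st.1, pvMoveFront st.2.1 note, st.2.2)
  else if layer = some "base" then (st.1, st.2.1, pvMoveFront st.2.2 note)
  else st

def pvApplyCore (gc : List (String × List String)) (dn : List String) :
    List (String × List String) :=
  let st := dn.foldl pvApplyStep
    (pvDictGetD gc "top_candidates" [], pvDictGetD gc "heart_candidates" [],
     pvDictGetD gc "base_candidates" [])
  [("top_candidates", PySem.List.slice st.1 none (some 5)),
   ("heart_candidates", PySem.List.slice st.2.1 none (some 5)),
   ("base_candidates", PySem.List.slice st.2.2 none (some 5)),
   ("excluded", pvDictGetD gc "excluded" [])]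

def apply_refinement_to_candidates_py (graph_candidates : List (String × List String)) (refinement : String) : List (String × List String) :=
  let direction_notes := (pvRefinementDirectionMap.get? refinement).getD []
  if direction_notes.isEmpty then graph_candidates
  else pvApplyCore graph_candidates direction_notes

-- ===== PORT B =====
-- [n for n in direction_notes if NOTE_LAYER_MAP.get(n) == layer]
def pvLayerNotes (dn : List String) (layer : String) : List String :=
  dn.filter (fun n => pvNoteLayerMap.get? n == some layer)

-- loop body: if x in pending: pending.discard(x) else: rest.append(x)
def pvDropStep (st : PySem.Set String × List String) (x : String) :
    PySem.Set String × List String :=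
  if PySem.Set.contains st.1 x then (PySem.Set.discard st.1 x, st.2)
  else (st.1, st.2 ++ [x])

def pvRebuild (gc : List (String × List String)) (dn : List String)
    (key layer : String) : List String :=
  let moved := pvLayerNotes dn layer
  let st := (pvDictGetD gc key []).foldl pvDropStep (PySem.Set.ofList moved, [])
  PySem.List.slice (moved.reverse ++ st.2) none (some 5)

def pvAltCore (gc : List (String × List String)) (dn : List String) :
    List (String × List String) :=
  [("top_candidates", pvRebuild gc dn "top_candidates" "top"),
   ("heart_candidates", pvRebuild gc dn "heart_candidates" "heart"),
   ("base_candidates", pvRebuild gc dn "base_candidates" "base"),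
   ("excluded", pvDictGetD gc "excluded" [])]

def apply_refinement_to_candidates_py_alt (graph_candidates : List (String × List String)) (refinement : String) : List (String × List String) :=
  let direction_notes := (pvRefinementDirectionMap.get? refinement).getD []
  if direction_notes.isEmpty then graph_candidates
  else pvAltCore graph_candidates direction_notes

-- ===== PRECONDITION & SPEC =====
def Spec_apply_refinement_to_candidates_py (graph_candidates : List (String × List String)) (refinement : String) (out : List (String × List String)) : Prop := out = apply_refinement_to_candidates_py_alt graph_candidates refinement
instance (graph_candidates : List (String × List String)) (refinement : String) (out : List (String × List String)) : Decidable (Spec_apply_refinement_to_candidates_py graph_candidates refinement out) := by unfold Spec_apply_refinement_to_candidates_py; infer_instance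

-- ===== CLAIM (what is proved, stated in full; the proofs are below) =====
def Claim_equal_apply_refinement_to_candidates_py : Prop := ∀ (graph_candidates : List (String × List String)) (refinement : String), Dom_apply_refinement_to_candidates_py graph_candidates refinement → Spec_apply_refinement_to_candidates_py graph_candidates refinement (apply_refinement_to_candidates_py graph_candidates refinement)

-- ===== LEMMAS AND PROOFS =====

-- Specification of B's drop pass as a structural recursion (proof-only helper).
def pvDropRec (s : List String) : List String → List String
  | [] => []
  | x :: xs =>
    if s.contains x then pvDropRec (s.filter (fun y => !(y == x))) xs
    else x :: pvDropRec s xs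

lemma pvDropStep_snd : ∀ (xs : List String) (s : PySem.Set String) (acc : List String),
    (xs.foldl pvDropStep (s, acc)).2 = acc ++ pvDropRec s xs := by
  intro xs
  induction xs with
  | nil => intro s acc; simp [pvDropRec]
  | cons x xs ih =>
    intro s acc
    by_cases h : x ∈ s
    · simp [pvDropStep, pvDropRec, PySem.Set.contains, PySem.Set.discard, h, ih]
    · simp [pvDropStep, pvDropRec, PySem.Set.contains, h, ih]

lemma pvDropRec_nil : ∀ xs : List String, pvDropRec [] xs = xs := by
  intro xs
  induction xs with
  | nil => rfl
  | cons x xs ih => simp [pvDropRec, ih]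

lemma pvFilter_ne_of_not_mem (s : List String) (n : String) (h : n ∉ s) :
    s.filter (fun y => !(y == n)) = s := by
  apply List.filter_eq_self.mpr
  intro y hy
  simp only [Bool.not_eq_eq_eq_not, Bool.not_true, beq_eq_false_iff_ne]
  exact fun e => h (e ▸ hy)

lemma pvFilter_comm (s : List String) (p q : String → Bool) :
    (s.filter p).filter q = (s.filter q).filter p := by
  simp only [List.filter_filter]
  congr 1
  funext y
  rw [Bool.and_comm]

lemma pvDropRec_erase : ∀ (xs s : List String) (n : String), n ∈ s →
    pvDropRec s xs = pvDropRec (s.filter (fun y => !(y == n))) (xs.erase n) := by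
  intro xs
  induction xs with
  | nil => intro s n _; simp [pvDropRec]
  | cons x xs ih =>
    intro s n hn
    by_cases hx : x = n
    · subst hx
      rw [List.erase_cons_head]
      simp [pvDropRec, hn]
    · rw [List.erase_cons_tail (by simpa using hx)]
      by_cases hs : x ∈ s
      · have hx' : x ∈ s.filter (fun y => !(y == n)) := by
          simp [List.mem_filter, hs, hx]
        have hn' : n ∈ s.filter (fun y => !(y == x)) := by
          simp [List.mem_filter, hn, Ne.symm hx]
        simp only [pvDropRec, List.contains_iff_mem, hs, hx', if_true]
        rw [ih _ n hn', pvFilter_comm]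
      · have hx' : x ∉ s.filter (fun y => !(y == n)) := by
          simp only [List.mem_filter]
          exact fun h => hs h.1
        simp [pvDropRec, hs, hx', ih s n hn]

lemma pvFoldl_add_cons : ∀ (ns s : List String) (n : String), (∀ x ∈ ns, x ≠ n) →
    ns.foldl PySem.Set.add (n :: s) = n :: ns.foldl PySem.Set.add s := by
  intro ns
  induction ns with
  | nil => intro s n _; rfl
  | cons x xs ih =>
    intro s n h
    have hxn : (x == n) = false := beq_eq_false_iff_ne.mpr (h x (by simp))
    have step : PySem.Set.add (n :: s) x = n :: PySem.Set.add s x := by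
      simp only [PySem.Set.add, PySem.Set.contains, List.contains_cons, hxn, Bool.false_or]
      by_cases hc : x ∈ s
      · simp [hc]
      · simp [hc]
    simp only [List.foldl_cons, step]
    exact ih _ n (fun y hy => h y (by simp [hy]))

lemma pvOfList_cons (n : String) (ns : List String) (h : n ∉ ns) :
    PySem.Set.ofList (n :: ns) = n :: PySem.Set.ofList ns := by
  show List.foldl PySem.Set.add PySem.Set.empty (n :: ns) = _
  simp only [List.foldl_cons]
  have : PySem.Set.add PySem.Set.empty n = [n] := rfl
  rw [this]
  exact pvFoldl_add_cons ns [] n (fun x hx e => h (e ▸ hx))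

lemma pvMoveFront_eq (xs : List String) (note : String) :
    pvMoveFront xs note = note :: xs.erase note := by
  unfold pvMoveFront
  by_cases h : note ∈ xs
  · have hc : xs.contains note = true := List.contains_iff_mem.mpr h
    rw [hc]
    simp [PySem.List.remove?_eq_some_erase xs note h, PySem.List.insert_zero]
  · have hc : xs.contains note = false := by
      simp [h]
    rw [hc]
    simp [PySem.List.insert_zero, List.erase_of_not_mem h]

lemma pvMoveFold : ∀ (notes : List String), notes.Nodup → ∀ xs : List String,
    notes.foldl pvMoveFront xs = notes.reverse ++ pvDropRec (PySem.Set.ofList notes) xs := by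
  intro notes
  induction notes with
  | nil =>
    intro _ xs
    simp [PySem.Set.ofList, PySem.Set.empty, pvDropRec_nil]
  | cons n ns ih =>
    intro hnd xs
    have hn : n ∉ ns := (List.nodup_cons.mp hnd).1
    have hns : ns.Nodup := (List.nodup_cons.mp hnd).2
    have hmem : n ∉ PySem.Set.ofList ns := fun h => hn ((PySem.Set.mem_ofList ns n).mp h)
    simp only [List.foldl_cons, pvMoveFront_eq]
    rw [ih hns (n :: xs.erase n)]
    have hhead : pvDropRec (PySem.Set.ofList ns) (n :: xs.erase n)
        = n :: pvDropRec (PySem.Set.ofList ns) (xs.erase n) := by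
      simp [pvDropRec, hmem]
    rw [hhead, pvOfList_cons n ns hn]
    have hK : pvDropRec (n :: PySem.Set.ofList ns) xs
        = pvDropRec ((n :: PySem.Set.ofList ns).filter (fun y => !(y == n))) (xs.erase n) := by
      exact pvDropRec_erase xs _ n (by simp)
    have hfilter : (n :: PySem.Set.ofList ns).filter (fun y => !(y == n))
        = PySem.Set.ofList ns := by
      rw [List.filter_cons]
      simp only [beq_self_eq_true, Bool.not_true, Bool.false_eq_true, if_neg, not_false_iff]
      exact pvFilter_ne_of_not_mem _ n hmem
    rw [hK, hfilter]
    simp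

lemma pvComp_eq (orig moved : List String) (hnd : moved.Nodup) :
    PySem.List.slice (moved.foldl pvMoveFront orig) none (some 5)
      = PySem.List.slice
          (moved.reverse ++ (orig.foldl pvDropStep (PySem.Set.ofList moved, [])).2)
          none (some 5) := by
  rw [pvMoveFold moved hnd orig, pvDropStep_snd]
  simp

lemma pvCore_eq (gc : List (String × List String)) (dn : List String)
    (hnd : dn.Nodup)
    (hfold : ∀ t h b : List String, dn.foldl pvApplyStep (t, h, b) =
      ((pvLayerNotes dn "top").foldl pvMoveFront t,
       (pvLayerNotes dn "heart").foldl pvMoveFront h,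
       (pvLayerNotes dn "base").foldl pvMoveFront b)) :
    pvApplyCore gc dn = pvAltCore gc dn := by
  have hmoved : ∀ layer : String, (pvLayerNotes dn layer).Nodup :=
    fun layer => List.Sublist.nodup List.filter_sublist hnd
  unfold pvApplyCore pvAltCore pvRebuild
  rw [hfold]
  simp only [List.cons.injEq, Prod.mk.injEq, and_true, true_and]
  exact ⟨pvComp_eq _ _ (hmoved "top"), pvComp_eq _ _ (hmoved "heart"),
         pvComp_eq _ _ (hmoved "base")⟩

-- lookup facts for the ten notes the direction lists contain
lemma pvL_vanilla : pvNoteLayerMap.get? "vanilla" = some "base" := by decide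
lemma pvL_amber : pvNoteLayerMap.get? "amber" = some "base" := by decide
lemma pvL_sandalwood : pvNoteLayerMap.get? "sandalwood" = some "base" := by decide
lemma pvL_patchouli : pvNoteLayerMap.get? "patchouli" = some "base" := by decide
lemma pvL_bergamot : pvNoteLayerMap.get? "bergamot" = some "top" := by decide
lemma pvL_neroli : pvNoteLayerMap.get? "neroli" = some "top" := by decide
lemma pvL_lavender : pvNoteLayerMap.get? "lavender" = some "heart" := by decide
lemma pvL_geranium : pvNoteLayerMap.get? "geranium" = some "heart" := by decide
lemma pvL_vetiver : pvNoteLayerMap.get? "vetiver" = some "base" := by decide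
lemma pvL_cedarwood : pvNoteLayerMap.get? "cedarwood" = some "base" := by decide

lemma pvItems_ref : pvRefinementDirectionMap.items =
  [("warmer", ["vanilla", "amber", "sandalwood", "patchouli"]),
   ("fresher", ["bergamot", "neroli", "lavender", "geranium"]),
   ("lighter", ["neroli", "geranium", "bergamot"]),
   ("stronger", ["vetiver", "patchouli", "amber", "cedarwood"])] := by decide

-- ===== VERDICT (by name: the statement is the Claim_ definition above) =====
theorem apply_refinement_to_candidates_py_spec : Claim_equal_apply_refinement_to_candidates_py := by
  intro gc refinement _
  unfold Spec_apply_refinement_to_candidates_py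
  by_cases h1 : refinement = "warmer"
  · subst h1
    show pvApplyCore gc ["vanilla", "amber", "sandalwood", "patchouli"]
        = pvAltCore gc ["vanilla", "amber", "sandalwood", "patchouli"]
    refine pvCore_eq gc _ (by decide) ?_
    intro t h b
    simp [pvApplyStep, pvLayerNotes, pvL_vanilla, pvL_amber, pvL_sandalwood, pvL_patchouli,
      List.filter]
  · by_cases h2 : refinement = "fresher"
    · subst h2
      show pvApplyCore gc ["bergamot", "neroli", "lavender", "geranium"]
          = pvAltCore gc ["bergamot", "neroli", "lavender", "geranium"]
      refine pvCore_eq gc _ (by decide) ?_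
      intro t h b
      simp [pvApplyStep, pvLayerNotes, pvL_bergamot, pvL_neroli, pvL_lavender, pvL_geranium,
        List.filter]
    · by_cases h3 : refinement = "lighter"
      · subst h3
        show pvApplyCore gc ["neroli", "geranium", "bergamot"]
            = pvAltCore gc ["neroli", "geranium", "bergamot"]
        refine pvCore_eq gc _ (by decide) ?_
        intro t h b
        simp [pvApplyStep, pvLayerNotes, pvL_neroli, pvL_geranium, pvL_bergamot, List.filter]
      · by_cases h4 : refinement = "stronger"
        · subst h4
          show pvApplyCore gc ["vetiver", "patchouli", "amber", "cedarwood"]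
              = pvAltCore gc ["vetiver", "patchouli", "amber", "cedarwood"]
          refine pvCore_eq gc _ (by decide) ?_
          intro t h b
          simp [pvApplyStep, pvLayerNotes, pvL_vetiver, pvL_patchouli, pvL_amber, pvL_cedarwood,
            List.filter]
        · have hnone : pvRefinementDirectionMap.get? refinement = none := by
            simp only [PySem.Dict.get?, pvItems_ref, List.find?]
            rw [beq_eq_false_iff_ne.mpr (Ne.symm h1), beq_eq_false_iff_ne.mpr (Ne.symm h2),
              beq_eq_false_iff_ne.mpr (Ne.symm h3), beq_eq_false_iff_ne.mpr (Ne.symm h4)]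
            rfl
          unfold apply_refinement_to_candidates_py apply_refinement_to_candidates_py_alt
          rw [hnone]
          simp
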